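-- pv_equiv track=rewrite | github.com/yahiahamdan/Leetcode-Problem-Solving- | mediam/turing2players.py | twoplayers
-- ===== SOURCE A (Python) =====
-- def twoplayers(numseq):
--     evenPlayer=0
--     oddPlayer=0
--     turn=0
--     while numseq:
--         currentNumber=numseq.pop()
--         if turn==0:
--           evenPlayer+=currentNumber
--         else:
--           oddPlayer+=currentNumber
--         if currentNumber%2==0:
--             numseq.reverse()
--         turn=1-turn
--
--     return evenPlayer-oddPlayer
-- ===== SOURCE B (Python) =====
-- def twoplayers(numseq):
--     lo, hi = 0, len(numseq) - 1
--     from_right = True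
--     even_player = 0
--     odd_player = 0
--     turn = 0
--     while lo <= hi:
--         if from_right:
--             current = numseq[hi]
--             hi -= 1
--         else:
--             current = numseq[lo]
--             lo += 1
--         if turn == 0:
--             even_player += current
--         else:
--             odd_player += current
--         if current % 2 == 0:
--             from_right = not from_right
--         turn = 1 - turn
--     return even_player - odd_player
-- ===== Notes on version B (the rewrite author's own statement) =====
-- stated objective: faster
-- what changed: B replaces A's pop-from-end with physical list.reverse() on every even number by a two-pointer deque scan over the untouched list with a direction flag, removing the O(n) reversals; note A empties its argument in place while B leaves it intact (return values are what is proved equal).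
import Mathlib
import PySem

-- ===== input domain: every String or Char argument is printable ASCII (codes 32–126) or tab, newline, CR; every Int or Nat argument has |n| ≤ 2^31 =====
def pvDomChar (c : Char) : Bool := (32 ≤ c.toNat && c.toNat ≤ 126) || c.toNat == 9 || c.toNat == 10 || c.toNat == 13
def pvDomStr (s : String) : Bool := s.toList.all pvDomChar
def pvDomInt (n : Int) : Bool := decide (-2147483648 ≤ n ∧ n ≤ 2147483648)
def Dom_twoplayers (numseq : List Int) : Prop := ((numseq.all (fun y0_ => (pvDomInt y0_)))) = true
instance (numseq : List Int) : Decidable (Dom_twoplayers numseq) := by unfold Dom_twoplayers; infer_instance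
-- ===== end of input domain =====

-- B replaces A's pop-from-end plus physical list.reverse() on every even number by a two-pointer
-- scan with a direction flag (O(n) instead of O(n^2)). A empties its argument in place, B does not
-- mutate it; the equivalence proved here is about the RETURN value.

-- ===== PORT A =====
-- literal port of A's while loop: pop() = getLast/dropLast, reverse() on even current number
def twoplayersGo (l : List Int) (evenPlayer oddPlayer turn : Int) : Int :=
  if h : l = [] then evenPlayer - oddPlayer
  else
    let cur := l.getLast h
    let e' := if turn = 0 then evenPlayer + cur else evenPlayer
    let o' := if turn = 0 then oddPlayer else oddPlayer + cur
    let rest := l.dropLast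
    let rest' := if PySem.Int.mod cur 2 = 0 then rest.reverse else rest
    twoplayersGo rest' e' o' (1 - turn)
termination_by l.length
decreasing_by
  have hl : 0 < l.length := List.length_pos_iff.mpr h
  split <;> simp [List.length_dropLast] <;> omega

def twoplayers (numseq : List Int) : Int := twoplayersGo numseq 0 0 0

-- ===== PORT B =====
-- literal port of Source B's while loop; lo/hi are always in range when reached, so the .getD 0
-- default after pyGet? is never used
def twoplayersAltGo (numseq : List Int) (lo hi : Int) (fromRight : Bool)
    (evenPlayer oddPlayer turn : Int) : Int :=
  if _h : lo ≤ hi then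
    let cur := if fromRight then (PySem.List.pyGet? numseq hi).getD 0
               else (PySem.List.pyGet? numseq lo).getD 0
    let hi' := if fromRight then hi - 1 else hi
    let lo' := if fromRight then lo else lo + 1
    let e' := if turn = 0 then evenPlayer + cur else evenPlayer
    let o' := if turn = 0 then oddPlayer else oddPlayer + cur
    let fr' := if PySem.Int.mod cur 2 = 0 then !fromRight else fromRight
    twoplayersAltGo numseq lo' hi' fr' e' o' (1 - turn)
  else evenPlayer - oddPlayer
termination_by (hi + 1 - lo).toNat
decreasing_by
  cases fromRight <;> simp <;> omega

def twoplayers_alt (numseq : List Int) : Int :=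
  twoplayersAltGo numseq 0 ((numseq.length : Int) - 1) true 0 0 0

-- ===== PRECONDITION & SPEC =====
def Spec_twoplayers (numseq : List Int) (out : Int) : Prop := out = twoplayers_alt numseq
instance (numseq : List Int) (out : Int) : Decidable (Spec_twoplayers numseq out) := by unfold Spec_twoplayers; infer_instance

-- ===== CLAIM (what is proved, stated in full; the proofs are below) =====
def Claim_equal_twoplayers : Prop := ∀ (numseq : List Int), Dom_twoplayers numseq → Spec_twoplayers numseq (twoplayers numseq)

-- ===== LEMMAS AND PROOFS =====

-- the segment of l that B's pointers [lo, hi] still cover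
def pvWin (l : List Int) (lo hi : Int) : List Int := (l.drop lo.toNat).take (hi + 1 - lo).toNat

theorem pvWin_cons {l : List Int} {lo hi : Int} (h0 : 0 ≤ lo) (hle : lo ≤ hi)
    (hh : hi < l.length) : pvWin l lo hi = l.getD lo.toNat 0 :: pvWin l (lo + 1) hi := by
  have h1 : lo.toNat < l.length := by omega
  have h2 : (hi + 1 - lo).toNat = (hi + 1 - (lo + 1)).toNat + 1 := by omega
  unfold pvWin
  rw [List.drop_eq_getElem_cons h1, h2, List.take_succ_cons,
    List.getD_eq_getElem l 0 h1, (by omega : (lo + 1).toNat = lo.toNat + 1)]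

theorem pvWin_concat {l : List Int} {lo hi : Int} (h0 : 0 ≤ lo) (hle : lo ≤ hi)
    (hh : hi < l.length) : pvWin l lo hi = pvWin l lo (hi - 1) ++ [l.getD hi.toNat 0] := by
  have h2 : (hi + 1 - lo).toNat = (hi - lo).toNat + 1 := by omega
  have h3 : hi.toNat < l.length := by omega
  unfold pvWin
  rw [h2, List.take_add_one, List.getElem?_drop]
  have h4 : lo.toNat + (hi - lo).toNat = hi.toNat := by omega
  rw [h4, List.getElem?_eq_getElem h3, List.getD_eq_getElem l 0 h3]
  congr 2
  omega

theorem go_eq (n : Nat) : ∀ (l : List Int) (lo hi e o t : Int) (fr : Bool),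
    0 ≤ lo → hi < l.length → (hi + 1 - lo).toNat = n →
    twoplayersAltGo l lo hi fr e o t =
      twoplayersGo (if fr then pvWin l lo hi else (pvWin l lo hi).reverse) e o t := by
  induction n with
  | zero =>
    intro l lo hi e o t fr h0 hh hn
    have hlt : ¬ lo ≤ hi := by omega
    have hwin : pvWin l lo hi = [] := by simp only [pvWin, hn, List.take_zero]
    rw [twoplayersAltGo, dif_neg hlt]
    cases fr <;> simp [hwin, twoplayersGo]
  | succ n ih =>
    intro l lo hi e o t fr h0 hh hn
    have hle : lo ≤ hi := by omega
    rw [twoplayersAltGo, dif_pos hle]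
    cases fr with
    | true =>
      have hget : (PySem.List.pyGet? l hi).getD 0 = l.getD hi.toNat 0 := by
        rw [PySem.List.pyGet?_of_nonneg l (by omega)]
        simp [List.getD]
      simp only [if_true, Bool.not_true, hget]
      rw [ih l lo (hi - 1) _ _ _ _ (by omega) (by omega) (by omega)]
      conv_rhs => rw [pvWin_concat h0 hle hh, twoplayersGo]
      rw [dif_neg (by simp)]
      simp only [List.getLast_concat, List.dropLast_concat]
      by_cases hpar : PySem.Int.mod (l.getD hi.toNat 0) 2 = 0
      · rw [if_pos hpar, if_pos hpar, if_neg (by simp)]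
      · rw [if_neg hpar, if_neg hpar, if_pos rfl]
    | false =>
      have hget : (PySem.List.pyGet? l lo).getD 0 = l.getD lo.toNat 0 := by
        rw [PySem.List.pyGet?_of_nonneg l (by omega)]
        simp [List.getD]
      simp only [Bool.false_eq_true, if_false, Bool.not_false, hget]
      rw [ih l (lo + 1) hi _ _ _ _ (by omega) (by omega) (by omega)]
      conv_rhs => rw [pvWin_cons h0 hle hh]
      conv_rhs => rw [show (l.getD lo.toNat 0 :: pvWin l (lo + 1) hi).reverse
        = (pvWin l (lo + 1) hi).reverse ++ [l.getD lo.toNat 0] by simp]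
      conv_rhs => rw [twoplayersGo]
      rw [dif_neg (by simp)]
      simp only [List.getLast_concat, List.dropLast_concat]
      by_cases hpar : PySem.Int.mod (l.getD lo.toNat 0) 2 = 0
      · rw [if_pos hpar, if_pos hpar, if_pos rfl]
        simp
      · rw [if_neg hpar, if_neg hpar, if_neg (by simp)]

-- ===== VERDICT (by name: the statement is the Claim_ definition above) =====
theorem twoplayers_spec : Claim_equal_twoplayers := by
  intro l _
  unfold Spec_twoplayers twoplayers twoplayers_alt
  have h := go_eq l.length l 0 ((l.length : Int) - 1) 0 0 0 true (by omega) (by omega) (by omega)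
  have hw : pvWin l 0 ((l.length : Int) - 1) = l := by
    simp [pvWin]
  rw [h, if_pos rfl, hw]
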